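-- pv_equiv track=rewrite | github.com/nosloc/AdventOfCode2024 | day5/main.py | wrongIndexInUpdate
-- ===== SOURCE A (Python) =====
-- defaultDic = {"before":set(), "after":set()}
--
-- def wrongIndexInUpdate(constraints, update):
--     notAllowed = set()
--     indexes = []
--     for i in range(len(update)):
--         elem = update[i]
--         if elem in notAllowed:
--             indexes.append(i)
--
--         # Add everything that should be before the elem to notAllowed
--         notAllowed = notAllowed.union(constraints.get(elem, defaultDic)["before"])
--     return len(indexes) == 0, indexes
-- ===== SOURCE B (Python) =====
-- defaultDic = {"before":set(), "after":set()}
--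
-- def wrongIndexInUpdate(constraints, update):
--     # one pass recording, for each value, the first position whose element bans it
--     firstBan = {}
--     for j, elem in enumerate(update):
--         for v in constraints.get(elem, defaultDic)["before"]:
--             if v not in firstBan:
--                 firstBan[v] = j
--     n = len(update)
--     indexes = [i for i, elem in enumerate(update) if firstBan.get(elem, n) < i]
--     return not indexes, indexes
-- ===== Notes on version B (the rewrite author's own statement) =====
-- stated objective: alternative
-- what changed: B drops A's per-iteration set union (notAllowed) and instead builds, in one pass, a dict mapping each value to the first position whose element bans it, then selects the indexes by a direct comparison firstBan.get(elem, n) < i.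
import Mathlib
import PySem

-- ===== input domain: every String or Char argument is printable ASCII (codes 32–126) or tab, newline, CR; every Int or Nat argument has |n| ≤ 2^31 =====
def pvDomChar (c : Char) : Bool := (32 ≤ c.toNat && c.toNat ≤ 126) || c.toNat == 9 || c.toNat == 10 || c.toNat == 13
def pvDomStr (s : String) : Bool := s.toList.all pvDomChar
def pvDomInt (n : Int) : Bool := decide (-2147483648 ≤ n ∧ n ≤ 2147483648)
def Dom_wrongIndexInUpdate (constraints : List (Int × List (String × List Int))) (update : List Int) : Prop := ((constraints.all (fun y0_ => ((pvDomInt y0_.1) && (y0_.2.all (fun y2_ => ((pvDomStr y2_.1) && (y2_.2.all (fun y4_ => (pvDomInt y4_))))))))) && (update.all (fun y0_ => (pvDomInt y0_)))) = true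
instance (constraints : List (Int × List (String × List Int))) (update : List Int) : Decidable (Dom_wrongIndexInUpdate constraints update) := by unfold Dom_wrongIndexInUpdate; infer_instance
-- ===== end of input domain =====

-- B replaces A's per-step set union with one pass recording each value's first banning position in a dict, then a direct filter.

-- ===== PORT A =====
-- module-level defaultDic = {"before":set(), "after":set()}
def defaultDicL : List (String × List Int) := [("before", []), ("after", [])]

-- constraints.get(elem, defaultDic)["before"]  (shared subexpression of both Pythons; [] where Python raises KeyError — excluded by Pre_)
def beforeGet (constraints : List (Int × List (String × List Int))) (elem : Int) : List Int :=
  ((PySem.Dict.mk (PySem.Dict.getD (PySem.Dict.mk constraints) elem defaultDicL)).get? "before").getD []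

-- one iteration of A's for-loop: membership test and append, then union of the before-set
def stepA (constraints : List (Int × List (String × List Int))) (update : List Int)
    (st : PySem.Set Int × List Int) (i : Int) : PySem.Set Int × List Int :=
  let elem := PySem.List.pyGetD update i 0
  let indexes := if st.1.contains elem then st.2 ++ [i] else st.2
  (PySem.Set.union st.1 (PySem.Set.ofList (beforeGet constraints elem)), indexes)

def wrongIndexInUpdate (constraints : List (Int × List (String × List Int))) (update : List Int) : Bool × List Int :=
  let st := (PySem.List.pyRange 0 (update.length : Int)).foldl (stepA constraints update) (PySem.Set.empty, [])
  (decide (st.2.length = 0), st.2)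

-- ===== PORT B =====
-- B's inner loop: for v in constraints.get(elem, defaultDic)["before"]: if v not in firstBan: firstBan[v] = j
def banStep (constraints : List (Int × List (String × List Int)))
    (d : PySem.Dict Int Int) (p : Int × Int) : PySem.Dict Int Int :=
  (beforeGet constraints p.2).foldl (fun d v => if d.contains v then d else d.insert v p.1) d

def wrongIndexInUpdate_alt (constraints : List (Int × List (String × List Int))) (update : List Int) : Bool × List Int :=
  let firstBan := (PySem.List.enumerate update).foldl (banStep constraints) PySem.Dict.empty
  let n : Int := update.length
  let indexes := ((PySem.List.enumerate update).filter
      (fun p => decide (PySem.Dict.getD firstBan p.2 n < p.1))).map (fun p => p.1)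
  (indexes.isEmpty, indexes)

-- ===== PRECONDITION & SPEC =====
-- Pre_ excludes exactly the inputs where Python A raises KeyError: some element of update whose
-- constraints entry (an inner dict) has no "before" key.
def Pre_wrongIndexInUpdate (constraints : List (Int × List (String × List Int))) (update : List Int) : Prop :=
  ∀ x ∈ update, (PySem.Dict.mk (PySem.Dict.getD (PySem.Dict.mk constraints) x defaultDicL)).contains "before" = true
instance (constraints : List (Int × List (String × List Int))) (update : List Int) : Decidable (Pre_wrongIndexInUpdate constraints update) := by unfold Pre_wrongIndexInUpdate; infer_instance

def pvWitness_wrongIndexInUpdate : (List (Int × List (String × List Int))) × List Int :=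
  ([(1, [("before", [2]), ("after", [])])], [2, 1])

def Spec_wrongIndexInUpdate (constraints : List (Int × List (String × List Int))) (update : List Int) (out : Bool × List Int) : Prop := out = wrongIndexInUpdate_alt constraints update
instance (constraints : List (Int × List (String × List Int))) (update : List Int) (out : Bool × List Int) : Decidable (Spec_wrongIndexInUpdate constraints update out) := by unfold Spec_wrongIndexInUpdate; infer_instance

-- ===== CLAIM (what is proved, stated in full; the proofs are below) =====
def Claim_equal_wrongIndexInUpdate : Prop := ∀ (constraints : List (Int × List (String × List Int))) (update : List Int), Dom_wrongIndexInUpdate constraints update → Pre_wrongIndexInUpdate constraints update → Spec_wrongIndexInUpdate constraints update (wrongIndexInUpdate constraints update)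

-- ===== LEMMAS AND PROOFS =====

-- proof-side predicate: "some earlier position j < i bans x"
def anyBan (c : List (Int × List (String × List Int))) (u : List Int) (x : Int) (i : Int) : Bool :=
  (PySem.List.pyRange 0 i).any (fun j => (beforeGet c (PySem.List.pyGetD u j 0)).contains x)

-- Invariant of A's loop after k iterations: the set holds exactly the values banned by the first k
-- elements, and the index list is the filter of range k by anyBan.
lemma loop_char (c : List (Int × List (String × List Int))) (u : List Int) (k : Nat) :
    (∀ x : Int,
      x ∈ ((PySem.List.pyRange 0 (k : Int)).foldl (stepA c u) (PySem.Set.empty, [])).1 ↔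
        anyBan c u x (k : Int) = true)
    ∧ ((PySem.List.pyRange 0 (k : Int)).foldl (stepA c u) (PySem.Set.empty, [])).2 =
        (PySem.List.pyRange 0 (k : Int)).filter (fun i => anyBan c u (PySem.List.pyGetD u i 0) i) := by
  induction k with
  | zero =>
      constructor
      · intro x
        simp [PySem.List.pyRange, PySem.Set.empty, anyBan]
      · simp [PySem.List.pyRange]
  | succ k ih =>
      obtain ⟨ih1, ih2⟩ := ih
      have hcast : ((k + 1 : Nat) : Int) = (k : Int) + 1 := by push_cast; ring
      have hpeel := PySem.List.pyRange_one_succ_right (a := 0) (b := (k : Int)) (by positivity)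
      have hcontains :
          (((PySem.List.pyRange 0 (k : Int)).foldl (stepA c u) (PySem.Set.empty, [])).1).contains
            (PySem.List.pyGetD u (k : Int) 0) = anyBan c u (PySem.List.pyGetD u (k : Int) 0) (k : Int) := by
        rw [Bool.eq_iff_iff]
        rw [PySem.Set.contains_iff, ih1]
      constructor
      · intro x
        rw [hcast, hpeel]
        rw [List.foldl_append]
        simp only [List.foldl_cons, List.foldl_nil, stepA]
        rw [PySem.Set.mem_union, ih1]
        simp only [anyBan, hpeel, List.any_append]
        simp [PySem.Set.mem_ofList]
      · rw [hcast, hpeel, List.foldl_append, List.filter_append]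
        simp only [List.foldl_cons, List.foldl_nil, stepA]
        rw [ih2, hcontains]
        cases hb : anyBan c u (PySem.List.pyGetD u (k : Int) 0) (k : Int) with
        | false =>
            simp only [hb, Bool.false_eq_true, if_false, List.filter_cons, List.filter_nil,
              List.append_nil]
        | true =>
            simp only [hb, if_true, List.filter_cons, List.filter_nil]

-- B's inner loop over one before-list: first-come-first-kept insertion
lemma innerFold_get? (bs : List Int) (j : Int) (d : PySem.Dict Int Int) (x : Int) :
    (bs.foldl (fun d v => if d.contains v then d else d.insert v j) d).get? x
      = if d.contains x then d.get? x else if bs.contains x then some j else none := by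
  induction bs generalizing d with
  | nil =>
      by_cases h : d.contains x = true
      · simp [h]
      · simp only [Bool.not_eq_true] at h
        simp [h, (PySem.Dict.get?_eq_none_iff_contains d x).2 h]
  | cons v bs ih =>
      simp only [List.foldl_cons]
      by_cases hv : d.contains v = true
      · rw [if_pos hv, ih]
        by_cases hx : x = v
        · subst hx; simp [hv]
        · simp [hx]
      · rw [if_neg hv, ih]
        simp only [Bool.not_eq_true] at hv
        by_cases hx : x = v
        · subst hx
          simp [PySem.Dict.get?_insert_self, hv]
        · rw [PySem.Dict.contains_insert, PySem.Dict.get?_insert_of_ne _ _ hx]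
          simp [hx]

lemma pyGetD_append_lt (xs ys : List Int) (j : Int) (h0 : 0 ≤ j) (h : j < (xs.length : Int)) :
    PySem.List.pyGetD (xs ++ ys) j 0 = PySem.List.pyGetD xs j 0 := by
  rw [PySem.List.pyGetD_eq_getElem (xs ++ ys) 0 h0 (by simp; omega),
      PySem.List.pyGetD_eq_getElem xs 0 h0 h]
  rw [List.getElem_append_left (by omega)]

-- the dict built by B's first loop: its entry for x is the FIRST position banning x
lemma firstBan_char (c : List (Int × List (String × List Int))) (u : List Int) (x : Int) :
    ((PySem.List.enumerate u).foldl (banStep c) PySem.Dict.empty).get? x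
      = ((PySem.List.pyRange 0 (u.length : Int)).filter
          (fun j => (beforeGet c (PySem.List.pyGetD u j 0)).contains x)).head? := by
  induction u using List.reverseRecOn with
  | nil => simp [PySem.List.enumerate, PySem.List.pyRange, PySem.Dict.empty, PySem.Dict.get?]
  | append_singleton xs b ih =>
      have hcast : ((xs ++ [b]).length : Int) = (xs.length : Int) + 1 := by simp
      have hpeel := PySem.List.pyRange_one_succ_right (a := 0) (b := (xs.length : Int)) (by positivity)
      rw [PySem.List.enumerate_append, List.foldl_append]
      simp only [PySem.List.enumerate, List.foldl_cons, List.foldl_nil, banStep]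
      rw [hcast, hpeel, List.filter_append]
      have hb : PySem.List.pyGetD (xs ++ [b]) (xs.length : Int) 0 = b := by
        rw [PySem.List.pyGetD_eq_getElem (xs ++ [b]) 0 (by positivity) (by simp)]
        simp
      have hcongr : (PySem.List.pyRange 0 (xs.length : Int)).filter
            (fun j => (beforeGet c (PySem.List.pyGetD (xs ++ [b]) j 0)).contains x)
          = (PySem.List.pyRange 0 (xs.length : Int)).filter
            (fun j => (beforeGet c (PySem.List.pyGetD xs j 0)).contains x) := by
        refine List.filter_congr ?_
        intro j hj
        rw [PySem.List.mem_pyRange_one] at hj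
        rw [pyGetD_append_lt xs [b] j hj.1 hj.2]
      rw [innerFold_get?, PySem.Dict.contains_eq_isSome_get?, ih, hcongr, List.head?_append]
      simp only [zero_add, List.filter_cons, List.filter_nil, hb]
      cases hh : ((PySem.List.pyRange 0 (xs.length : Int)).filter
          (fun j => (beforeGet c (PySem.List.pyGetD xs j 0)).contains x)).head? with
      | none =>
          simp only [Option.isSome_none, Bool.false_eq_true, if_false, Option.none_or]
          cases hcb : (beforeGet c b).contains x <;> simp
      | some a => simp

-- head of a filtered strictly-increasing list is its least member satisfying the predicate
lemma head?_filter_least {l : List Int} {p : Int → Bool} (hl : l.Pairwise (· < ·)) {a : Int}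
    (ha : (l.filter p).head? = some a) :
    p a = true ∧ a ∈ l ∧ ∀ b ∈ l, p b = true → a ≤ b := by
  induction l with
  | nil => simp at ha
  | cons y t ih =>
      rw [List.pairwise_cons] at hl
      obtain ⟨hy, ht⟩ := hl
      by_cases hp : p y = true
      · rw [List.filter_cons_of_pos hp, List.head?_cons, Option.some_inj] at ha
        subst ha
        refine ⟨hp, List.mem_cons_self, ?_⟩
        intro b hb _
        rcases List.mem_cons.1 hb with rfl | hb
        · exact le_refl _
        · exact le_of_lt (hy b hb)
      · rw [List.filter_cons_of_neg (by simpa using hp)] at ha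
        obtain ⟨h1, h2, h3⟩ := ih ht ha
        refine ⟨h1, List.mem_cons_of_mem _ h2, ?_⟩
        intro b hb hpb
        rcases List.mem_cons.1 hb with rfl | hb
        · exact absurd hpb hp
        · exact h3 b hb hpb

lemma pyRange_zero_pairwise (n : Nat) : (PySem.List.pyRange 0 (n : Int)).Pairwise (· < ·) := by
  rw [PySem.List.pyRange_zero_natCast]
  exact List.pairwise_lt_range.map _ (by intro a b h; exact_mod_cast h)

-- B's filter test at position i equals A's "banned by some earlier position" test
lemma getD_lt_iff_anyBan (c : List (Int × List (String × List Int))) (u : List Int)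
    (x i : Int) (hn : i < (u.length : Int)) :
    decide (PySem.Dict.getD ((PySem.List.enumerate u).foldl (banStep c) PySem.Dict.empty) x (u.length : Int) < i)
      = anyBan c u x i := by
  rw [PySem.Dict.getD_eq_get?_getD, firstBan_char]
  rw [Bool.eq_iff_iff, decide_eq_true_iff, anyBan, List.any_eq_true]
  cases hh : ((PySem.List.pyRange 0 (u.length : Int)).filter
      (fun j => (beforeGet c (PySem.List.pyGetD u j 0)).contains x)).head? with
  | none =>
      rw [List.head?_eq_none_iff, List.filter_eq_nil_iff] at hh
      simp only [Option.getD_none]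
      constructor
      · intro h; omega
      · rintro ⟨j, hj, hpj⟩
        rw [PySem.List.mem_pyRange_one] at hj
        exact absurd hpj (by simpa using hh j (PySem.List.mem_pyRange_one.2 ⟨hj.1, by omega⟩))
  | some a =>
      obtain ⟨hpa, hamem, hleast⟩ := head?_filter_least (pyRange_zero_pairwise u.length) hh
      rw [PySem.List.mem_pyRange_one] at hamem
      simp only [Option.getD_some]
      constructor
      · intro h
        exact ⟨a, PySem.List.mem_pyRange_one.2 ⟨hamem.1, h⟩, hpa⟩
      · rintro ⟨j, hj, hpj⟩
        rw [PySem.List.mem_pyRange_one] at hj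
        have := hleast j (PySem.List.mem_pyRange_one.2 ⟨hj.1, by omega⟩) hpj
        omega

lemma length_eq_zero_decide_isEmpty (l : List Int) : decide (l.length = 0) = l.isEmpty := by
  cases l <;> simp

-- ===== VERDICT (by name: the statement is the Claim_ definition above) =====
theorem wrongIndexInUpdate_spec : Claim_equal_wrongIndexInUpdate := by
  intro c u _hdom _hpre
  unfold Spec_wrongIndexInUpdate wrongIndexInUpdate wrongIndexInUpdate_alt
  obtain ⟨-, h2⟩ := loop_char c u u.length
  have hfilt :
      ((PySem.List.enumerate u).filter
          (fun p => decide (PySem.Dict.getD ((PySem.List.enumerate u).foldl (banStep c) PySem.Dict.empty) p.2 (u.length : Int) < p.1))).map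
          (fun p => p.1)
        = (PySem.List.pyRange 0 (u.length : Int)).filter
            (fun i => anyBan c u (PySem.List.pyGetD u i 0) i) := by
    obtain ⟨F, hF⟩ : ∃ F, F = (PySem.List.enumerate u).foldl (banStep c) PySem.Dict.empty :=
      ⟨_, rfl⟩
    rw [← hF]
    conv_lhs => rw [PySem.List.enumerate_eq_map_pyRange u 0]
    rw [List.filter_map, List.map_map]
    have hcongr : (PySem.List.pyRange 0 (PySem.List.len u)).filter
          ((fun p : Int × Int => decide (PySem.Dict.getD F p.2 (u.length : Int) < p.1)) ∘
            (fun j => (j, PySem.List.pyGetD u j 0)))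
        = (PySem.List.pyRange 0 (PySem.List.len u)).filter
            (fun i => anyBan c u (PySem.List.pyGetD u i 0) i) := by
      refine List.filter_congr ?_
      intro j hj
      have hj' := PySem.List.mem_pyRange_one.1 (by simpa [PySem.List.len] using hj)
      simp only [Function.comp]
      rw [hF]
      exact getD_lt_iff_anyBan c u (PySem.List.pyGetD u j 0) j
        (by simpa [PySem.List.len] using hj'.2)
    rw [hcongr]
    simp only [PySem.List.len, Function.comp_def]
    exact List.map_id' _
  simp only [h2, ← hfilt, length_eq_zero_decide_isEmpty]
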